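-- pv_equiv track=rewrite | github.com/MarkLamin/Markov-Chess | Pieces_BETA.py | theoreticalMovesB
-- ===== SOURCE A (Python) =====
-- def theoreticalMovesB(x,y):
--     #returns a list of theoretical coordinates based on the diagonal(s)
--     #intentionally does not include x or y
--     #range is always 7 as that is the max length of a diagonal
--
--     #return this
--     theList = []
--
--     i=x
--     j=y
--
--     #checks up-right direction
--     for k in range(7):
--         i += 1
--         j += 1
--         if ((0<i<9) and (0<j<9)):
--             theList.append((i,j))
--
--     i=x
--     j=y
--
--     #checks up-left direction
--     for k in range(7):
--         i -= 1
--         j += 1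
--         if ((0<i<9) and (0<j<9)):
--             theList.append((i,j))
--
--     i=x
--     j=y
--
--     #checks down-right direction
--     for k in range(7):
--         i+=1
--         j-=1
--         if ((0<i<9) and (0<j<9)):
--             theList.append((i,j))
--
--     i=x
--     j=y
--
--     #checks down-left direction
--     for k in range(7):
--         i-=1
--         j-=1
--         if ((0<i<9) and (0<j<9)):
--             theList.append((i,j))
--
--     return theList
-- ===== SOURCE B (Python) =====
-- def theoreticalMovesB(x, y):
--     # For each diagonal direction, compute the closed-form range of step
--     # counts k that keep both coordinates on the board, then emit the
--     # squares directly with no per-square bounds check.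
--     out = []
--     for dx, dy in ((1, 1), (-1, 1), (1, -1), (-1, -1)):
--         lo_x, hi_x = (1 - x, 8 - x) if dx == 1 else (x - 8, x - 1)
--         lo_y, hi_y = (1 - y, 8 - y) if dy == 1 else (y - 8, y - 1)
--         lo = max(1, lo_x, lo_y)
--         hi = min(7, hi_x, hi_y)
--         for k in range(lo, hi + 1):
--             out.append((x + dx * k, y + dy * k))
--     return out
-- ===== Notes on version B (the rewrite author's own statement) =====
-- stated objective: alternative
-- what changed: Replaces the four fixed 7-step scans with per-square bounds checks by a closed-form computation of the valid step range for each diagonal direction, emitting exactly the on-board squares with no filtering.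
import Mathlib
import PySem

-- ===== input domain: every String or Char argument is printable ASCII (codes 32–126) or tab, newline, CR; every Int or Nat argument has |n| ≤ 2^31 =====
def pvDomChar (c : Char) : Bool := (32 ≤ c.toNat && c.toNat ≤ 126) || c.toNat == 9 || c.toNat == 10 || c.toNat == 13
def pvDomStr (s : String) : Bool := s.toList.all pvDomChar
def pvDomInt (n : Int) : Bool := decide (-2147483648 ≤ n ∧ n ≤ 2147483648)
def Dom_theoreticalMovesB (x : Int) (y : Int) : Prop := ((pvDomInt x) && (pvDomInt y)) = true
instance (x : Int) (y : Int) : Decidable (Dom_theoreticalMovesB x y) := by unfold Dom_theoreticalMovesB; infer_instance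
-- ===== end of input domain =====

-- B replaces A's four fixed 7-step scans with per-square bounds checks by a
-- closed-form valid step range per diagonal direction (objective: alternative).

-- ===== PORT A =====
def theoreticalMovesB (x : Int) (y : Int) : List (Int × Int) :=
  let theList : List (Int × Int) := []
  -- up-right
  let s1 := (PySem.List.pyRange 0 7 1).foldl (fun (s : Int × Int × List (Int × Int)) _ =>
      let i := s.1 + 1
      let j := s.2.1 + 1
      (i, j, if (0 < i ∧ i < 9) ∧ (0 < j ∧ j < 9) then s.2.2 ++ [(i, j)] else s.2.2))
      (x, y, theList)
  -- up-left
  let s2 := (PySem.List.pyRange 0 7 1).foldl (fun (s : Int × Int × List (Int × Int)) _ =>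
      let i := s.1 - 1
      let j := s.2.1 + 1
      (i, j, if (0 < i ∧ i < 9) ∧ (0 < j ∧ j < 9) then s.2.2 ++ [(i, j)] else s.2.2))
      (x, y, s1.2.2)
  -- down-right
  let s3 := (PySem.List.pyRange 0 7 1).foldl (fun (s : Int × Int × List (Int × Int)) _ =>
      let i := s.1 + 1
      let j := s.2.1 - 1
      (i, j, if (0 < i ∧ i < 9) ∧ (0 < j ∧ j < 9) then s.2.2 ++ [(i, j)] else s.2.2))
      (x, y, s2.2.2)
  -- down-left
  let s4 := (PySem.List.pyRange 0 7 1).foldl (fun (s : Int × Int × List (Int × Int)) _ =>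
      let i := s.1 - 1
      let j := s.2.1 - 1
      (i, j, if (0 < i ∧ i < 9) ∧ (0 < j ∧ j < 9) then s.2.2 ++ [(i, j)] else s.2.2))
      (x, y, s3.2.2)
  s4.2.2

-- ===== PORT B =====
def theoreticalMovesB_alt (x : Int) (y : Int) : List (Int × Int) :=
  ([((1 : Int), (1 : Int)), (-1, 1), (1, -1), (-1, -1)]).foldl (fun out d =>
    let dx := d.1
    let dy := d.2
    let bx := if dx = 1 then (1 - x, 8 - x) else (x - 8, x - 1)
    let by' := if dy = 1 then (1 - y, 8 - y) else (y - 8, y - 1)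
    let lo := max (max 1 bx.1) by'.1
    let hi := min (min 7 bx.2) by'.2
    out ++ (PySem.List.pyRange lo (hi + 1) 1).map (fun k => (x + dx * k, y + dy * k))) []

-- ===== PRECONDITION & SPEC =====
def Spec_theoreticalMovesB (x : Int) (y : Int) (out : List (Int × Int)) : Prop := out = theoreticalMovesB_alt x y
instance (x : Int) (y : Int) (out : List (Int × Int)) : Decidable (Spec_theoreticalMovesB x y out) := by unfold Spec_theoreticalMovesB; infer_instance

-- ===== CLAIM (what is proved, stated in full; the proofs are below) =====
def Claim_equal_theoreticalMovesB : Prop := ∀ (x : Int) (y : Int), Dom_theoreticalMovesB x y → Spec_theoreticalMovesB x y (theoreticalMovesB x y)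

-- ===== LEMMAS AND PROOFS =====

-- canonical form of one diagonal direction: among the 7 candidate steps k+1,
-- keep exactly the on-board squares
def canonD (x y dx dy : Int) : List (Int × Int) :=
  (PySem.List.pyRange 0 7 1).filterMap (fun k =>
    if (0 < x + dx * (k + 1) ∧ x + dx * (k + 1) < 9) ∧
       (0 < y + dy * (k + 1) ∧ y + dy * (k + 1) < 9)
    then some (x + dx * (k + 1), y + dy * (k + 1)) else none)

-- A's one-direction loop computed in closed form (invariant over the range length)
lemma dirFold (dx dy : Int) (n : Nat) (x y : Int) (acc : List (Int × Int)) :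
    (PySem.List.pyRange 0 n 1).foldl (fun (s : Int × Int × List (Int × Int)) _ =>
        (s.1 + dx, s.2.1 + dy,
          if (0 < s.1 + dx ∧ s.1 + dx < 9) ∧ (0 < s.2.1 + dy ∧ s.2.1 + dy < 9)
          then s.2.2 ++ [(s.1 + dx, s.2.1 + dy)] else s.2.2))
      (x, y, acc)
    = (x + dx * n, y + dy * n,
       acc ++ (PySem.List.pyRange 0 n 1).filterMap (fun k =>
         if (0 < x + dx * (k + 1) ∧ x + dx * (k + 1) < 9) ∧
            (0 < y + dy * (k + 1) ∧ y + dy * (k + 1) < 9)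
         then some (x + dx * (k + 1), y + dy * (k + 1)) else none)) := by
  induction n with
  | zero => simp [PySem.List.pyRange_one_eq_nil]
  | succ n ih =>
    have hc : ((n + 1 : Nat) : Int) = (n : Int) + 1 := by push_cast; ring
    rw [hc, PySem.List.pyRange_one_succ_right (by positivity), List.foldl_append, ih,
      List.filterMap_append]
    simp only [List.foldl_cons, List.foldl_nil, List.filterMap_cons, List.filterMap_nil]
    have hx : x + dx * (n : Int) + dx = x + dx * ((n : Int) + 1) := by ring
    have hy : y + dy * (n : Int) + dy = y + dy * ((n : Int) + 1) := by ring
    rw [hx, hy]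
    by_cases h : (0 < x + dx * ((n : Int) + 1) ∧ x + dx * ((n : Int) + 1) < 9) ∧
        (0 < y + dy * ((n : Int) + 1) ∧ y + dy * ((n : Int) + 1) < 9)
    · simp [h, List.append_assoc]
    · simp [h]

lemma dirFold7 (dx dy x y : Int) (acc : List (Int × Int)) :
    (PySem.List.pyRange 0 7 1).foldl (fun (s : Int × Int × List (Int × Int)) _ =>
        (s.1 + dx, s.2.1 + dy,
          if (0 < s.1 + dx ∧ s.1 + dx < 9) ∧ (0 < s.2.1 + dy ∧ s.2.1 + dy < 9)
          then s.2.2 ++ [(s.1 + dx, s.2.1 + dy)] else s.2.2))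
      (x, y, acc)
    = (x + dx * 7, y + dy * 7, acc ++ canonD x y dx dy) := by
  have h := dirFold dx dy 7 x y acc
  norm_num at h
  rw [canonD]
  exact h

-- B's contiguous step range for one direction, re-expressed as the canonical filterMap
lemma rangeMap (lo hi : Int) (h1 : 1 ≤ lo) (h2 : hi ≤ 7) (f : Int → Int × Int) :
    (PySem.List.pyRange lo (hi + 1) 1).map f
    = (PySem.List.pyRange 0 7 1).filterMap (fun k =>
        if lo ≤ k + 1 ∧ k + 1 ≤ hi then some (f (k + 1)) else none) := by
  by_cases h : hi < lo
  · rw [PySem.List.pyRange_one_eq_nil (by omega), List.map_nil]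
    symm
    rw [List.filterMap_eq_nil_iff]
    intro a ha
    rw [PySem.List.mem_pyRange_one] at ha
    rw [if_neg]
    omega
  · have h' : lo ≤ hi := by omega
    have h3 : lo ≤ 7 := le_trans h' h2
    interval_cases lo <;> interval_cases hi <;>
      norm_num [PySem.List.pyRange_one, List.range_succ,
        List.filterMap_cons, List.filterMap_nil,
        show (1:Int).toNat = 1 from rfl, show (2:Int).toNat = 2 from rfl,
        show (3:Int).toNat = 3 from rfl, show (4:Int).toNat = 4 from rfl,
        show (5:Int).toNat = 5 from rfl, show (6:Int).toNat = 6 from rfl,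
        show (7:Int).toNat = 7 from rfl]

lemma seg_eq (x y dx dy lox loy hix hiy : Int)
    (hcx : ∀ k : Int, (0 < x + dx * k ∧ x + dx * k < 9) ↔ (lox ≤ k ∧ k ≤ hix))
    (hcy : ∀ k : Int, (0 < y + dy * k ∧ y + dy * k < 9) ↔ (loy ≤ k ∧ k ≤ hiy)) :
    (PySem.List.pyRange (max (max 1 lox) loy) (min (min 7 hix) hiy + 1) 1).map
        (fun k => (x + dx * k, y + dy * k))
    = canonD x y dx dy := by
  rw [rangeMap _ _ ((le_max_left 1 lox).trans (le_max_left _ _))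
    ((min_le_left _ _).trans (min_le_left _ _))]
  rw [canonD]
  apply List.filterMap_congr
  intro k hk
  rw [PySem.List.mem_pyRange_one] at hk
  by_cases h : (0 < x + dx * (k + 1) ∧ x + dx * (k + 1) < 9) ∧
      (0 < y + dy * (k + 1) ∧ y + dy * (k + 1) < 9)
  · have hx := (hcx (k + 1)).mp h.1
    have hy := (hcy (k + 1)).mp h.2
    rw [if_pos (by refine ⟨?_, ?_⟩ <;> simp only [max_le_iff, le_min_iff] <;> omega), if_pos h]
  · rw [if_neg ?_, if_neg h]
    intro hcon
    apply h
    simp only [max_le_iff, le_min_iff] at hcon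
    exact ⟨(hcx _).mpr ⟨hcon.1.1.2, hcon.2.1.2⟩, (hcy _).mpr ⟨hcon.1.2, hcon.2.2⟩⟩

lemma A_eq (x y : Int) : theoreticalMovesB x y =
    ((canonD x y 1 1 ++ canonD x y (-1) 1) ++ canonD x y 1 (-1)) ++ canonD x y (-1) (-1) := by
  unfold theoreticalMovesB
  simp only [sub_eq_add_neg]
  rw [dirFold7 1 1, dirFold7 (-1) 1, dirFold7 1 (-1), dirFold7 (-1) (-1)]
  simp [List.append_assoc]

lemma B_eq (x y : Int) : theoreticalMovesB_alt x y =
    ((canonD x y 1 1 ++ canonD x y (-1) 1) ++ canonD x y 1 (-1)) ++ canonD x y (-1) (-1) := by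
  unfold theoreticalMovesB_alt
  simp only [List.foldl_cons, List.foldl_nil, reduceIte,
    if_neg (show ¬((-1 : Int) = 1) from by decide)]
  rw [seg_eq x y 1 1 (1 - x) (1 - y) (8 - x) (8 - y) (fun k => by omega) (fun k => by omega),
    seg_eq x y (-1) 1 (x - 8) (1 - y) (x - 1) (8 - y) (fun k => by omega) (fun k => by omega),
    seg_eq x y 1 (-1) (1 - x) (y - 8) (8 - x) (y - 1) (fun k => by omega) (fun k => by omega),
    seg_eq x y (-1) (-1) (x - 8) (y - 8) (x - 1) (y - 1) (fun k => by omega) (fun k => by omega)]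
  simp [List.append_assoc]

-- ===== VERDICT (by name: the statement is the Claim_ definition above) =====
theorem theoreticalMovesB_spec : Claim_equal_theoreticalMovesB := by
  intro x y _
  unfold Spec_theoreticalMovesB
  rw [A_eq, B_eq]
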